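-- pv_equiv track=rewrite | github.com/MarouanSidali/Web-Mining | apriori2.py | get_frequent_k_itemsets
-- ===== SOURCE A (Python) =====
-- from itertools import combinations
--
-- def generate_candidates(prev_frequent_itemsets, k):
--     candidates = set()
--     for itemset1 in prev_frequent_itemsets:
--         for itemset2 in prev_frequent_itemsets:
--             itemset1 = set(itemset1)
--             itemset2 = set(itemset2)
--             if len(itemset1.union(itemset2)) == k:
--                 candidates.add(tuple(sorted(itemset1.union(itemset2))))
--     return candidates
--
-- def prune_candidates(candidates, prev_frequent_itemsets, k):
--     pruned_candidates = set()
--     for candidate in candidates: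
--         is_frequent = True
--         subsets = [set(item) for item in combinations(candidate, k - 1)]
--         for subset in subsets:
--             if tuple(sorted(subset)) not in prev_frequent_itemsets:
--                 is_frequent = False
--                 break
--         if is_frequent:
--             pruned_candidates.add(candidate)
--     return pruned_candidates
--
-- def get_frequent_k_itemsets(data, prev_frequent_itemsets, k, min_support):
--     candidates = generate_candidates(prev_frequent_itemsets, k)
--     pruned_candidates = prune_candidates(candidates, prev_frequent_itemsets, k)
--     item_counts = {tuple(itemset): 0 for itemset in pruned_candidates}
--
--     for transaction in data:
--         for candidate in pruned_candidates:
--             if set(candidate).issubset(transaction):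
--                 item_counts[candidate] += 1
--
--     frequent_k_itemsets = {itemset: support for itemset, support in item_counts.items() if support >= min_support}
--     return frequent_k_itemsets
-- ===== SOURCE B (Python) =====
-- from itertools import combinations
--
--
-- def get_frequent_k_itemsets(data, prev_frequent_itemsets, k, min_support):
--     # Fused single stage: candidate generation, dedup, subset pruning and count-table
--     # initialisation happen in one pass over the pairs of previous itemsets (hash set
--     # lookup replaces the list scan of the prune step); the support count is inverted
--     # to enumerate the k-subsets of each transaction with a dictionary lookup instead
--     # of testing every candidate against every transaction with issubset.
--     prev_set = set(prev_frequent_itemsets)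
--     counts = {}
--     for a in prev_frequent_itemsets:
--         for b in prev_frequent_itemsets:
--             u = set(a) | set(b)
--             if len(u) == k:
--                 key = tuple(sorted(u))
--                 if key not in counts and all(sub in prev_set for sub in combinations(key, k - 1)):
--                     counts[key] = 0
--     if counts:  # every key has length k, so here 0 <= k and combinations(items, k) is legal
--         for transaction in data:
--             items = sorted(set(transaction))
--             for sub in combinations(items, k):
--                 if sub in counts:
--                     counts[sub] += 1
--     return {itemset: s for itemset, s in counts.items() if s >= min_support}
-- ===== Notes on version B (the rewrite author's own statement) =====
-- stated objective: alternative
-- what changed: B fuses A's three staged passes (candidate set, prune set, zero-initialised dict) into one pass over pairs of previous itemsets that builds the count table directly with hash-set subset lookups, and inverts the counting pass: instead of testing every pruned candidate against every transaction with set.issubset, it enumerates the k-combinations of each transaction's sorted distinct items and increments matching table entries by dictionary lookup.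
import Mathlib
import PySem

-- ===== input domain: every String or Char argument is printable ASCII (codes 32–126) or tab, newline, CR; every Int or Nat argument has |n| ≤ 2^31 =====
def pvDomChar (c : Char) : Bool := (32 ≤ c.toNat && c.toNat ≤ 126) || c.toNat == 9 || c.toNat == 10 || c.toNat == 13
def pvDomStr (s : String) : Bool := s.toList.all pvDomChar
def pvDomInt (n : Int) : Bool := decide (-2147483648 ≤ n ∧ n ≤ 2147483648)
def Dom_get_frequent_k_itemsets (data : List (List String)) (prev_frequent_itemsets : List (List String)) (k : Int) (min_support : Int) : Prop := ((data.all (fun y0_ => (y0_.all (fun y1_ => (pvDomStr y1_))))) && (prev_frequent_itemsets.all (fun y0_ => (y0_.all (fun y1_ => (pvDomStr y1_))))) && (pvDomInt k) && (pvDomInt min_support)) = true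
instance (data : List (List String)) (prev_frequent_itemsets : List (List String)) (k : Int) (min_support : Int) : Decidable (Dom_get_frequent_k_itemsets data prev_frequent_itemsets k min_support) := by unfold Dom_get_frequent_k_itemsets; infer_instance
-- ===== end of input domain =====

-- B fuses A's staged passes (candidate set, prune set, zero-initialised dict) into one
-- pair-pass building the count table directly with hash-set subset lookups, and inverts
-- the counting pass: it enumerates the k-combinations of each transaction's sorted
-- distinct items with dictionary lookup instead of testing every candidate with issubset.


-- ===== PORT A =====

def generate_candidates (prev_frequent_itemsets : List (List String)) (k : Int) : PySem.Set (List String) :=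
  prev_frequent_itemsets.foldl (fun candidates itemset1 =>
    prev_frequent_itemsets.foldl (fun candidates itemset2 =>
      let s1 := PySem.Set.ofList itemset1
      let s2 := PySem.Set.ofList itemset2
      if PySem.Set.len (PySem.Set.union s1 s2) = k then
        PySem.Set.add candidates (PySem.List.sorted (PySem.Set.union s1 s2) (fun x => x) false)
      else candidates) candidates) PySem.Set.empty

-- the `for subset in subsets: if tuple(sorted(subset)) not in prev: …; break` loop
def checkSubsets (prev_frequent_itemsets : List (List String)) : List (PySem.Set String) → Bool
  | [] => true
  | subset :: rest =>
    if !(prev_frequent_itemsets.contains (PySem.List.sorted subset (fun x => x) false)) then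
      false
    else checkSubsets prev_frequent_itemsets rest

-- combinations(candidate, k-1): Python raises ValueError when k - 1 < 0, reachable
-- only for k = 0 with [] ∈ prev_frequent_itemsets — excluded by Pre_; (k-1).toNat is
-- exact elsewhere.
def prune_candidates (candidates : PySem.Set (List String)) (prev_frequent_itemsets : List (List String)) (k : Int) : PySem.Set (List String) :=
  candidates.foldl (fun pruned candidate =>
    let subsets := (PySem.List.combinations candidate (k - 1).toNat).map PySem.Set.ofList
    if checkSubsets prev_frequent_itemsets subsets then PySem.Set.add pruned candidate
    else pruned) PySem.Set.empty

def get_frequent_k_itemsets (data : List (List String)) (prev_frequent_itemsets : List (List String)) (k : Int) (min_support : Int) : List (List String × Int) :=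
  let candidates := generate_candidates prev_frequent_itemsets k
  let pruned_candidates := prune_candidates candidates prev_frequent_itemsets k
  let item_counts : PySem.Dict (List String) Int :=
    pruned_candidates.foldl (fun d itemset => d.insert itemset 0) PySem.Dict.empty
  let item_counts := data.foldl (fun d transaction =>
    pruned_candidates.foldl (fun d candidate =>
      if PySem.Set.issubset (PySem.Set.ofList candidate) transaction then
        d.modify candidate 0 (fun v => v + 1)  -- item_counts[candidate] += 1 (key present)
      else d) d) item_counts
  (item_counts.items).filter (fun p => min_support ≤ p.2)

-- ===== PORT B =====
def get_frequent_k_itemsets_alt (data : List (List String)) (prev_frequent_itemsets : List (List String)) (k : Int) (min_support : Int) : List (List String × Int) :=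
  let prev_set := PySem.Set.ofList prev_frequent_itemsets
  -- fused pass: generation, dedup (`key not in counts`), pruning, zero-initialisation.
  -- combinations(key, k - 1) raises for k = 0 (key = (), reachable only with [] among
  -- the previous itemsets) — excluded by Pre_; (k-1).toNat is exact elsewhere.
  let counts : PySem.Dict (List String) Int :=
    prev_frequent_itemsets.foldl (fun counts a =>
      prev_frequent_itemsets.foldl (fun counts b =>
        let u := PySem.Set.union (PySem.Set.ofList a) (PySem.Set.ofList b)
        if PySem.Set.len u = k then
          let key := PySem.List.sorted u (fun x => x) false
          if !counts.contains key
              && (PySem.List.combinations key (k - 1).toNat).all (fun sub => PySem.Set.contains prev_set sub) then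
            counts.insert key 0
          else counts
        else counts) counts) PySem.Dict.empty
  -- `if counts:` — any key has length k, so the guarded branch has 0 ≤ k and k.toNat exact
  let counts :=
    if counts.size ≠ 0 then
      data.foldl (fun counts transaction =>
        let items := PySem.List.sorted (PySem.Set.ofList transaction) (fun x => x) false
        (PySem.List.combinations items k.toNat).foldl (fun counts sub =>
          if counts.contains sub then counts.modify sub 0 (fun v => v + 1) else counts) counts) counts
    else counts
  (counts.items).filter (fun p => min_support ≤ p.2)

-- ===== PRECONDITION & SPEC =====
-- Pre_ excludes exactly the inputs on which the Python A raises ValueError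
-- (combinations(candidate, -1)): k = 0 with [] among the previous itemsets.
def Pre_get_frequent_k_itemsets (data : List (List String)) (prev_frequent_itemsets : List (List String)) (k : Int) (min_support : Int) : Prop :=
  ¬ (k = 0 ∧ [] ∈ prev_frequent_itemsets)
instance (data : List (List String)) (prev_frequent_itemsets : List (List String)) (k : Int) (min_support : Int) : Decidable (Pre_get_frequent_k_itemsets data prev_frequent_itemsets k min_support) := by unfold Pre_get_frequent_k_itemsets; infer_instance

def pvWitness_get_frequent_k_itemsets : List (List String) × List (List String) × Int × Int :=
  ([["a", "b"], ["a", "c"]], [["a"], ["b"], ["c"]], 2, 1)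

def Spec_get_frequent_k_itemsets (data : List (List String)) (prev_frequent_itemsets : List (List String)) (k : Int) (min_support : Int) (out : List (List String × Int)) : Prop := out = get_frequent_k_itemsets_alt data prev_frequent_itemsets k min_support
instance (data : List (List String)) (prev_frequent_itemsets : List (List String)) (k : Int) (min_support : Int) (out : List (List String × Int)) : Decidable (Spec_get_frequent_k_itemsets data prev_frequent_itemsets k min_support out) := by unfold Spec_get_frequent_k_itemsets; infer_instance

-- ===== CLAIM (what is proved, stated in full; the proofs are below) =====
def Claim_equal_get_frequent_k_itemsets : Prop := ∀ (data : List (List String)) (prev_frequent_itemsets : List (List String)) (k : Int) (min_support : Int), Dom_get_frequent_k_itemsets data prev_frequent_itemsets k min_support → Pre_get_frequent_k_itemsets data prev_frequent_itemsets k min_support → Spec_get_frequent_k_itemsets data prev_frequent_itemsets k min_support (get_frequent_k_itemsets data prev_frequent_itemsets k min_support)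

-- ===== LEMMAS AND PROOFS =====

-- a property of the accumulator is preserved along a foldl
theorem pv_foldl_inv {α β : Type} {P : β → Prop} (f : β → α → β) :
    ∀ (l : List α) (init : β), P init → (∀ b a, a ∈ l → P b → P (f b a)) →
    P (l.foldl f init) := by
  intro l
  induction l with
  | nil => exact fun init h _ => h
  | cons x xs ih =>
    intro init hinit hstep
    exact ih _ (hstep _ _ (by simp) hinit) (fun b a ha hb => hstep b a (by simp [ha]) hb)

-- a relation between two accumulators is preserved along two folds over the same list
theorem pv_foldl_rel {α β γ : Type} (R : β → γ → Prop) (f : β → α → β) (g : γ → α → γ) :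
    ∀ (l : List α) (b : β) (c : γ), R b c → (∀ b c a, a ∈ l → R b c → R (f b a) (g c a)) →
    R (l.foldl f b) (l.foldl g c) := by
  intro l
  induction l with
  | nil => exact fun b c h _ => h
  | cons x xs ih =>
    intro b c h hstep
    exact ih _ _ (hstep _ _ _ (by simp) h) (fun b c a ha hbc => hstep b c a (by simp [ha]) hbc)

-- a fold guarded by an accumulator-independent condition is a fold over the filter
theorem pv_guard_filter {α β : Type} (q : α → Bool) (g : β → α → β) :
    ∀ (l : List α) (d : β),
    l.foldl (fun d a => if q a then g d a else d) d = (l.filter q).foldl g d := by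
  intro l
  induction l with
  | nil => intro d; rfl
  | cons x xs ih =>
    intro d
    by_cases h : q x = true <;> simp [h, ih]

theorem pv_combos_nodup {α : Type} : ∀ (r : Nat) (xs : List α), xs.Nodup →
    (PySem.List.combinations xs r).Nodup := by
  intro r xs
  induction xs generalizing r with
  | nil =>
    intro _
    cases r <;> simp [PySem.List.combinations_zero, PySem.List.combinations_nil_succ]
  | cons x xs ih =>
    intro hnd
    have hx : x ∉ xs := (List.nodup_cons.mp hnd).1
    have hxs : xs.Nodup := (List.nodup_cons.mp hnd).2
    cases r with
    | zero => simp [PySem.List.combinations_zero]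
    | succ n =>
      rw [PySem.List.combinations_cons_succ]
      apply List.Nodup.append
      · exact (ih n hxs).map (fun a b h => by injection h)
      · exact ih (n + 1) hxs
      · intro l hl hl'
        rcases List.mem_map.mp hl with ⟨c, _, rfl⟩
        have := ((PySem.List.mem_combinations_iff xs (n + 1) (x :: c)).mp hl').1
        exact hx (this.subset (by simp))

-- a strictly increasing list is a sublist of a strictly increasing list iff it is
-- a subset of it
theorem pv_sublist_of_subset {α : Type} [LinearOrder α] :
    ∀ (ys c : List α), c.Pairwise (· < ·) → ys.Pairwise (· < ·) →
    (∀ x ∈ c, x ∈ ys) → c.Sublist ys := by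
  intro ys
  induction ys with
  | nil =>
    intro c _ _ h
    cases c with
    | nil => exact List.Sublist.refl _
    | cons a c => exact absurd (h a (by simp)) (by simp)
  | cons y ys ih =>
    intro c hc hy h
    cases c with
    | nil => exact List.nil_sublist _
    | cons a c =>
      by_cases hay : a = y
      · subst hay
        apply List.cons_sublist_cons.mpr
        apply ih c (hc.sublist (List.sublist_cons_self a c)) (hy.sublist (List.sublist_cons_self a ys))
        intro x hx
        have hax : a < x := (List.pairwise_cons.mp hc).1 x hx
        rcases List.mem_cons.mp (h x (by simp [hx])) with h' | h'
        · exact absurd h' (ne_of_gt hax)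
        · exact h'
      · have ha : a ∈ ys := by
          rcases List.mem_cons.mp (h a (by simp)) with h' | h'
          · exact absurd h' hay
          · exact h'
        have hya : y < a := (List.pairwise_cons.mp hy).1 a ha
        apply List.Sublist.cons
        apply ih (a :: c) hc (hy.sublist (List.sublist_cons_self y ys))
        intro x hx
        have hax : a ≤ x := by
          rcases List.mem_cons.mp hx with rfl | hx'
          · exact le_refl x
          · exact le_of_lt ((List.pairwise_cons.mp hc).1 x hx')
        rcases List.mem_cons.mp (h x hx) with h' | h'
        · subst h'; exact absurd (lt_of_lt_of_le hya hax) (lt_irrefl x)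
        · exact h'

-- python sorted() of a duplicate-free list is strictly increasing
theorem pv_sorted_pairwise_lt (xs : List String) (hnd : xs.Nodup) :
    (PySem.List.sorted xs (fun x => x) false).Pairwise (· < ·) := by
  have hle := PySem.List.sorted_pairwise xs (fun x => x)
  have hnd' : (PySem.List.sorted xs (fun x => x) false).Nodup :=
    (PySem.List.sorted_perm xs (fun x => x) false).nodup_iff.mpr hnd
  have := hle.and hnd'
  exact this.imp (fun h => lt_of_le_of_ne h.1 h.2)

-- A's short-circuit prune loop is an `all` over the subsets
theorem pv_checkSubsets_eq_all (prev : List (List String)) :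
    ∀ (l : List (PySem.Set String)),
    checkSubsets prev l = l.all (fun s => prev.contains (PySem.List.sorted s (fun x => x) false)) := by
  intro l
  induction l with
  | nil => rfl
  | cons s rest ih =>
    by_cases h : prev.contains (PySem.List.sorted s (fun x => x) false) = true <;>
      simp [checkSubsets, ih]

-- on a strictly increasing candidate, A's prune test equals B's hash-set test
theorem pv_prune_test_eq (prev : List (List String)) (r : Nat) (c : List String)
    (hc : c.Pairwise (· < ·)) :
    checkSubsets prev ((PySem.List.combinations c r).map PySem.Set.ofList) =
    (PySem.List.combinations c r).all (fun sub => PySem.Set.contains (PySem.Set.ofList prev) sub) := by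
  rw [pv_checkSubsets_eq_all, List.all_map, Bool.eq_iff_iff, List.all_eq_true, List.all_eq_true]
  apply forall₂_congr
  intro sub hsub
  rw [Bool.eq_iff_iff]
  apply Eq.to_iff
  have hsl : sub.Sublist c := (PySem.List.mem_combinations_iff c r sub).mp hsub |>.1
  have hp : sub.Pairwise (· < ·) := hc.sublist hsl
  have hnd : sub.Nodup := hp.imp (fun h => ne_of_lt h)
  have h1 : PySem.Set.ofList sub = sub := PySem.Set.ofList_eq_self_of_nodup sub hnd
  have h2 : PySem.List.sorted sub (fun x => x) false = sub :=
    PySem.List.sorted_eq_self_of_pairwise sub (fun x => x) (hp.imp le_of_lt)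
  rw [Function.comp_apply, h1, h2, PySem.Set.contains_eq_listContains]
  simp [PySem.Set.mem_ofList]

-- every generated candidate has integer length k and is strictly increasing
theorem pv_gc_props (prev : List (List String)) (k : Int) :
    ∀ c ∈ generate_candidates prev k, (c.length : Int) = k ∧ c.Pairwise (· < ·) := by
  unfold generate_candidates
  refine pv_foldl_inv (P := fun s : PySem.Set (List String) =>
    ∀ c ∈ s, (c.length : Int) = k ∧ c.Pairwise (· < ·)) _ _ _ ?_ ?_
  · intro c hc; simp [PySem.Set.empty] at hc
  · intro b a _ hb
    refine pv_foldl_inv (P := fun s : PySem.Set (List String) =>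
      ∀ c ∈ s, (c.length : Int) = k ∧ c.Pairwise (· < ·)) _ _ _ hb ?_
    intro b' a' _ hb' c hc
    simp only at hc
    split at hc
    · rcases (PySem.Set.mem_add _ _ _).mp hc with h | h
      · exact hb' c h
      · subst h
        have hu : (PySem.Set.union (PySem.Set.ofList a) (PySem.Set.ofList a')).Nodup :=
          PySem.Set.nodup_union _ _ (PySem.Set.nodup_ofList _)
        constructor
        · simp only [PySem.List.length_sorted]
          simpa [PySem.Set.len] using ‹PySem.Set.len _ = k›
        · exact pv_sorted_pairwise_lt _ hu
    · exact hb' c hc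

-- the prune pass over a duplicate-free candidate list is a filter
theorem pv_prune_eq_filter (prev : List (List String)) (k : Int) :
    ∀ (l : List (List String)) (acc : PySem.Set (List String)), l.Nodup → (∀ c ∈ l, c ∉ acc) →
    (l.foldl (fun pruned candidate =>
      if checkSubsets prev ((PySem.List.combinations candidate (k - 1).toNat).map PySem.Set.ofList)
      then PySem.Set.add pruned candidate else pruned) acc) =
    acc ++ l.filter (fun c =>
      checkSubsets prev ((PySem.List.combinations c (k - 1).toNat).map PySem.Set.ofList)) := by
  intro l
  induction l with
  | nil => intro acc _ _; simp
  | cons x xs ih =>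
    intro acc hnd hfresh
    have hx : x ∉ acc := hfresh x (by simp)
    by_cases h : checkSubsets prev ((PySem.List.combinations x (k - 1).toNat).map PySem.Set.ofList) = true
    · rw [List.foldl_cons, if_pos h, PySem.Set.add_of_not_mem hx,
        ih (acc ++ [x]) (List.nodup_cons.mp hnd).2 ?_, List.filter_cons, if_pos h]
      · simp
      intro c hc
      simp only [List.mem_append, List.mem_singleton]
      rintro (h' | rfl)
      · exact hfresh c (by simp [hc]) h'
      · exact (List.nodup_cons.mp hnd).1 hc
    · rw [List.foldl_cons, if_neg h, ih acc (List.nodup_cons.mp hnd).2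
        (fun c hc => hfresh c (by simp [hc])), List.filter_cons, if_neg h]

-- generated candidates are duplicate-free (a PySem.Set built by add from empty)
theorem pv_gc_nodup (prev : List (List String)) (k : Int) :
    (generate_candidates prev k).Nodup := by
  unfold generate_candidates
  refine pv_foldl_inv (P := fun s : PySem.Set (List String) => s.Nodup) _ _ _ List.nodup_nil ?_
  intro b a _ hb
  refine pv_foldl_inv (P := fun s : PySem.Set (List String) => s.Nodup) _ _ _ hb ?_
  intro b' a' _ hb'
  simp only
  split
  · exact PySem.Set.nodup_add _ _ hb'
  · exact hb'

-- the fused pass of B builds exactly the zero-initialised dict over the pruned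
-- candidates: its items are the prune-filtered generated candidates paired with 0
theorem pv_fused_items (prev : List (List String)) (k : Int) :
    (prev.foldl (fun counts a =>
      prev.foldl (fun counts b =>
        let u := PySem.Set.union (PySem.Set.ofList a) (PySem.Set.ofList b)
        if PySem.Set.len u = k then
          let key := PySem.List.sorted u (fun x => x) false
          if !counts.contains key
              && (PySem.List.combinations key (k - 1).toNat).all
                  (fun sub => PySem.Set.contains (PySem.Set.ofList prev) sub) then
            counts.insert key 0
          else counts
        else counts) counts) (PySem.Dict.empty : PySem.Dict (List String) Int)).items =
    ((generate_candidates prev k).filter (fun c =>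
      checkSubsets prev ((PySem.List.combinations c (k - 1).toNat).map PySem.Set.ofList))).map
      (fun c => (c, (0 : Int))) := by
  unfold generate_candidates
  generalize (k - 1).toNat = r
  have main := pv_foldl_rel
    (R := fun (s : PySem.Set (List String)) (d : PySem.Dict (List String) Int) =>
      s.Nodup ∧ (∀ c ∈ s, c.Pairwise (· < ·)) ∧
      d.items = (s.filter (fun c =>
        checkSubsets prev ((PySem.List.combinations c r).map PySem.Set.ofList))).map
        (fun c => (c, (0 : Int))))
    (f := fun candidates itemset1 =>
      prev.foldl (fun candidates itemset2 =>
        let s1 := PySem.Set.ofList itemset1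
        let s2 := PySem.Set.ofList itemset2
        if PySem.Set.len (PySem.Set.union s1 s2) = k then
          PySem.Set.add candidates (PySem.List.sorted (PySem.Set.union s1 s2) (fun x => x) false)
        else candidates) candidates)
    (g := fun counts a =>
      prev.foldl (fun counts b =>
        let u := PySem.Set.union (PySem.Set.ofList a) (PySem.Set.ofList b)
        if PySem.Set.len u = k then
          let key := PySem.List.sorted u (fun x => x) false
          if !counts.contains key
              && (PySem.List.combinations key r).all
                  (fun sub => PySem.Set.contains (PySem.Set.ofList prev) sub) then
            counts.insert key 0
          else counts
        else counts) counts)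
    prev PySem.Set.empty PySem.Dict.empty
    ⟨List.nodup_nil, by intro c hc; simp [PySem.Set.empty] at hc, rfl⟩
    ?_
  · exact main.2.2
  · intro s d a _ hR
    refine pv_foldl_rel
      (R := fun (s : PySem.Set (List String)) (d : PySem.Dict (List String) Int) =>
        s.Nodup ∧ (∀ c ∈ s, c.Pairwise (· < ·)) ∧
        d.items = (s.filter (fun c =>
          checkSubsets prev ((PySem.List.combinations c r).map PySem.Set.ofList))).map
          (fun c => (c, (0 : Int)))) _ _ prev s d hR ?_
    rintro s d b _ ⟨hnd, hpw, hitems⟩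
    simp only
    split
    · -- a new candidate key is formed
      rename_i hlen
      set key := PySem.List.sorted (PySem.Set.union (PySem.Set.ofList a) (PySem.Set.ofList b)) (fun x => x) false with hkey
      have hkpw : key.Pairwise (· < ·) :=
        pv_sorted_pairwise_lt _ (PySem.Set.nodup_union _ _ (PySem.Set.nodup_ofList _))
      have htest := pv_prune_test_eq prev r key hkpw
      have hkeysd : d.keys = (s.filter (fun c =>
          checkSubsets prev ((PySem.List.combinations c r).map PySem.Set.ofList))).map id := by
        show d.items.map Prod.fst = _
        rw [hitems, List.map_map]; rfl
      have hcont : d.contains key =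
          (decide (key ∈ s) && checkSubsets prev ((PySem.List.combinations key r).map PySem.Set.ofList)) := by
        rw [PySem.Dict.contains_eq_decide_mem_keys, hkeysd, List.map_id]
        by_cases hks : key ∈ s
        · by_cases hchk : checkSubsets prev ((PySem.List.combinations key r).map PySem.Set.ofList) = true
          · simp [List.mem_filter, hks, hchk]
          · simp only [hks, decide_true, Bool.true_and]
            simp [List.mem_filter, hchk]
        · simp [List.mem_filter, hks]
      by_cases hks : key ∈ s
      · -- key already generated: the set does not change, and B inserts nothing new
        rw [PySem.Set.add_of_mem hks]
        refine ⟨hnd, hpw, ?_⟩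
        by_cases hchk : checkSubsets prev ((PySem.List.combinations key r).map PySem.Set.ofList) = true
        · -- key passed pruning: it is already a dict key, no insert
          rw [hcont]
          simp [hks, hchk, hitems]
        · -- key fails pruning: B re-checks and again does not insert
          rw [hcont]
          simp only [hks, decide_true, Bool.true_and, hchk, Bool.not_false, Bool.true_and]
          rw [← htest]
          simp [hchk, hitems]
      · -- fresh key: the set appends, and B inserts iff the prune test passes
        rw [PySem.Set.add_of_not_mem hks]
        refine ⟨?_, ?_, ?_⟩
        · rw [List.nodup_append]
          refine ⟨hnd, List.nodup_singleton _, ?_⟩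
          intro a ha b hb
          rw [List.mem_singleton] at hb
          subst hb
          intro h
          exact hks (h ▸ ha)
        · intro c hc
          rcases List.mem_append.mp hc with h | h
          · exact hpw c h
          · rw [List.mem_singleton.mp h]; exact hkpw
        · rw [hcont]
          simp only [hks, decide_false, Bool.false_and, Bool.not_false, Bool.true_and]
          rw [← htest]
          by_cases hchk : checkSubsets prev ((PySem.List.combinations key r).map PySem.Set.ofList) = true
          · have hfresh : d.contains key = false := by
              rw [hcont]; simp [hks]
            rw [if_pos hchk, PySem.Dict.items_insert_of_not_contains _ _ hfresh, hitems,
              List.filter_append, List.filter_cons, if_pos hchk]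
            simp
          · rw [if_neg hchk, hitems, List.filter_append, List.filter_cons, if_neg hchk]
            simp
    · exact ⟨hnd, hpw, hitems⟩

-- the pruned candidates inherit the generated candidates' properties
theorem pv_pruned_props (prev : List (List String)) (k : Int) :
    (prune_candidates (generate_candidates prev k) prev k).Nodup ∧
    ∀ c ∈ prune_candidates (generate_candidates prev k) prev k,
      (c.length : Int) = k ∧ c.Pairwise (· < ·) := by
  unfold prune_candidates
  rw [pv_prune_eq_filter prev k _ PySem.Set.empty (pv_gc_nodup prev k) (by intro c _; simp [PySem.Set.empty]),
    show (PySem.Set.empty : PySem.Set (List String)) = [] from rfl, List.nil_append]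
  exact ⟨(pv_gc_nodup prev k).filter _, fun c hc => pv_gc_props prev k c (List.mem_of_mem_filter hc)⟩

-- Set.update with elements already present is the identity
theorem pv_update_self (s : PySem.Set (List String)) :
    ∀ (l : List (List String)), (∀ x ∈ l, x ∈ s) → PySem.Set.update s l = s := by
  intro l
  induction l generalizing s with
  | nil => intro _; rfl
  | cons x xs ih =>
    intro h
    have hxs : x ∈ s := h x (by simp)
    have hadd : PySem.Set.add s x = s := by
      simp [pysem, PySem.Set.add, hxs]
    show PySem.Set.update s (x :: xs) = s
    rw [show PySem.Set.update s (x :: xs) = PySem.Set.update (PySem.Set.add s x) xs from rfl,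
      hadd]
    exact ih s (fun y hy => h y (by simp [hy]))

-- two modify-(+1) folds over count-equal lists of existing keys agree
theorem pv_modify_fold_eq (d : PySem.Dict (List String) Int) (l1 l2 : List (List String))
    (hnd : d.keys.Nodup) (h1 : ∀ x ∈ l1, x ∈ d.keys) (h2 : ∀ x ∈ l2, x ∈ d.keys)
    (hcount : ∀ c, l1.count c = l2.count c) :
    l1.foldl (fun d c => d.modify c 0 (fun v => v + 1)) d =
    l2.foldl (fun d c => d.modify c 0 (fun v => v + 1)) d := by
  have hk1 := PySem.Dict.keys_foldl_modify l1 (0 : Int) (fun _ _ v => v + 1) d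
  have hk2 := PySem.Dict.keys_foldl_modify l2 (0 : Int) (fun _ _ v => v + 1) d
  rw [pv_update_self _ _ h1] at hk1
  rw [pv_update_self _ _ h2] at hk2
  apply PySem.Dict.ext
  rw [PySem.Dict.items_eq_map_keys _ (by rw [hk1]; exact hnd) 0,
    PySem.Dict.items_eq_map_keys _ (by rw [hk2]; exact hnd) 0, hk1, hk2]
  apply List.map_congr_left
  intro c _
  rw [PySem.Dict.getD_foldl_modify_add_one, PySem.Dict.getD_foldl_modify_add_one, hcount]

-- a fold guarded by `d.contains` is a fold over the filter by the initial keys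
theorem pv_contains_guard :
    ∀ (l : List (List String)) (d : PySem.Dict (List String) Int),
    l.foldl (fun d c => if d.contains c then d.modify c 0 (fun v => v + 1) else d) d =
    (l.filter (fun c => d.contains c)).foldl (fun d c => d.modify c 0 (fun v => v + 1)) d := by
  intro l
  induction l with
  | nil => intro d; rfl
  | cons x xs ih =>
    intro d
    by_cases h : d.contains x = true
    · have hcong : ∀ c ∈ xs, (d.modify x 0 (fun v => v + 1)).contains c = d.contains c := by
        intro c _
        rw [PySem.Dict.contains_modify]
        by_cases hcx : (c == x) = true
        · simp [h, (by simpa using hcx : c = x)]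
        · simp [hcx]
      rw [List.foldl_cons, if_pos h, List.filter_cons, if_pos h, List.foldl_cons,
        ih (d.modify x 0 (fun v => v + 1)), List.filter_congr hcong]
    · rw [List.foldl_cons, if_neg h, List.filter_cons, if_neg h]
      exact ih d

-- the core count: for a candidate of length k, the number of occurrences among the
-- k-combinations of a transaction's sorted distinct items is its issubset indicator
theorem pv_combos_count (c t : List String) (k : Int)
    (hlen : (c.length : Int) = k) (hcp : c.Pairwise (· < ·)) :
    ((PySem.List.combinations (PySem.List.sorted (PySem.Set.ofList t) (fun x => x) false) k.toNat).count c) =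
    if PySem.Set.issubset (PySem.Set.ofList c) t then 1 else 0 := by
  set items := PySem.List.sorted (PySem.Set.ofList t) (fun x => x) false with hitems
  have hknat : k.toNat = c.length := by omega
  have hind : items.Nodup :=
    (PySem.List.sorted_perm _ _ _).nodup_iff.mpr (PySem.Set.nodup_ofList t)
  have hip : items.Pairwise (· < ·) := pv_sorted_pairwise_lt _ (PySem.Set.nodup_ofList t)
  have hmem_items : ∀ x, x ∈ items ↔ x ∈ t := by
    intro x
    rw [hitems, PySem.List.mem_sorted, PySem.Set.mem_ofList]
  by_cases hsub : PySem.Set.issubset (PySem.Set.ofList c) t = true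
  · have hsubc : ∀ x ∈ c, x ∈ items := by
      intro x hx
      exact (hmem_items x).mpr
        (((PySem.Set.issubset_iff _ _).mp hsub) x ((PySem.Set.mem_ofList c x).mpr hx))
    have hsl : c.Sublist items := pv_sublist_of_subset items c hcp hip hsubc
    have hmem : c ∈ PySem.List.combinations items k.toNat :=
      (PySem.List.mem_combinations_iff items k.toNat c).mpr ⟨hsl, hknat.symm⟩
    rw [if_pos hsub]
    exact List.count_eq_one_of_mem (pv_combos_nodup k.toNat items hind) hmem
  · have hnm : c ∉ PySem.List.combinations items k.toNat := by
      intro hmem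
      rcases (PySem.List.mem_combinations_iff items k.toNat c).mp hmem with ⟨hsl, _⟩
      apply hsub
      rw [PySem.Set.issubset_iff]
      intro x hx
      exact (hmem_items x).mp (hsl.subset ((PySem.Set.mem_ofList c x).mp hx))
    simp only [hsub]
    exact List.count_eq_zero_of_not_mem hnm

-- the two counting passes produce the same dictionary
theorem pv_outer_eq (P : List (List String)) (k : Int) (hnd : P.Nodup)
    (hprops : ∀ c ∈ P, (c.length : Int) = k ∧ c.Pairwise (· < ·)) :
    ∀ (data : List (List String)) (d : PySem.Dict (List String) Int), d.keys = P →
    data.foldl (fun d transaction =>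
      P.foldl (fun d candidate =>
        if PySem.Set.issubset (PySem.Set.ofList candidate) transaction then
          d.modify candidate 0 (fun v => v + 1)
        else d) d) d =
    data.foldl (fun d transaction =>
      (PySem.List.combinations (PySem.List.sorted (PySem.Set.ofList transaction) (fun x => x) false) k.toNat).foldl (fun d subset =>
        if d.contains subset then d.modify subset 0 (fun v => v + 1) else d) d) d := by
  intro data
  induction data with
  | nil => intro d _; rfl
  | cons t rest ih =>
    intro d hk
    simp only [List.foldl_cons]
    have hqA := pv_guard_filter (fun c => PySem.Set.issubset (PySem.Set.ofList c) t)
      (fun d c => d.modify c 0 (fun v => v + 1)) P d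
    have hqB := pv_contains_guard
      (PySem.List.combinations (PySem.List.sorted (PySem.Set.ofList t) (fun x => x) false) k.toNat) d
    set combs := PySem.List.combinations (PySem.List.sorted (PySem.Set.ofList t) (fun x => x) false) k.toNat with hcombs
    have hstep :
        P.foldl (fun d c => if PySem.Set.issubset (PySem.Set.ofList c) t then
          d.modify c 0 (fun v => v + 1) else d) d =
        combs.foldl (fun d c => if d.contains c then d.modify c 0 (fun v => v + 1) else d) d := by
      rw [hqA, hqB]
      apply pv_modify_fold_eq
      · rw [hk]; exact hnd
      · intro x hx; rw [hk]; exact (List.mem_filter.mp hx).1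
      · intro x hx
        have := (List.mem_filter.mp hx).2
        rw [PySem.Dict.contains_eq_decide_mem_keys] at this
        simpa using this
      · intro c
        by_cases hcP : c ∈ P
        · have hcprops := hprops c hcP
          have hcountA : (P.filter (fun c => PySem.Set.issubset (PySem.Set.ofList c) t)).count c =
              if PySem.Set.issubset (PySem.Set.ofList c) t then 1 else 0 := by
            by_cases hcond : PySem.Set.issubset (PySem.Set.ofList c) t = true
            · rw [if_pos hcond,
                List.count_filter (p := fun c => PySem.Set.issubset (PySem.Set.ofList c) t) (a := c) hcond]
              exact List.count_eq_one_of_mem hnd hcP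
            · rw [if_neg hcond]
              apply List.count_eq_zero_of_not_mem
              intro hmem
              exact hcond (by simpa using (List.mem_filter.mp hmem).2)
          have hcountB : (combs.filter (fun c => d.contains c)).count c = combs.count c := by
            apply List.count_filter
            rw [PySem.Dict.contains_eq_decide_mem_keys, hk]
            simpa using hcP
          rw [hcountA, hcountB, pv_combos_count c t k hcprops.1 hcprops.2]
        · have hA : (P.filter (fun c => PySem.Set.issubset (PySem.Set.ofList c) t)).count c = 0 := by
            apply List.count_eq_zero_of_not_mem
            intro hmem; exact hcP (List.mem_of_mem_filter hmem)
          have hB : (combs.filter (fun c => d.contains c)).count c = 0 := by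
            apply List.count_eq_zero_of_not_mem
            intro hmem
            have := (List.mem_filter.mp hmem).2
            rw [PySem.Dict.contains_eq_decide_mem_keys, hk] at this
            exact hcP (by simpa using this)
          rw [hA, hB]
    rw [← hstep]
    apply ih
    -- keys are preserved by the counting step over the candidates
    rw [hqA, PySem.Dict.keys_foldl_modify, pv_update_self]
    · exact hk
    · intro x hx; rw [hk]; exact (List.mem_filter.mp hx).1

-- the initial dictionary: one key per pruned candidate, value 0
theorem pv_init_items (P : List (List String)) (hnd : P.Nodup) :
    (P.foldl (fun d itemset => d.insert itemset 0) (PySem.Dict.empty : PySem.Dict (List String) Int)).items =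
    P.map (fun c => (c, (0 : Int))) := by
  have := PySem.Dict.items_foldl_insert_fresh P (fun c => c) (fun _ => (0 : Int))
    (PySem.Dict.empty : PySem.Dict (List String) Int)
    (by intro a _; simp [pysem]) (by simpa using hnd)
  simpa [pysem] using this

-- ===== VERDICT (by name: the statement is the Claim_ definition above) =====
theorem get_frequent_k_itemsets_spec : Claim_equal_get_frequent_k_itemsets := by
  intro data prev k min_support _ _
  show _ = _
  simp only [get_frequent_k_itemsets, get_frequent_k_itemsets_alt]
  obtain ⟨hnd, hprops⟩ := pv_pruned_props prev k
  -- B's fused table equals A's staged zero-initialised table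
  have hPfilter : prune_candidates (generate_candidates prev k) prev k =
      (generate_candidates prev k).filter (fun c =>
        checkSubsets prev ((PySem.List.combinations c (k - 1).toNat).map PySem.Set.ofList)) := by
    unfold prune_candidates
    rw [pv_prune_eq_filter prev k _ PySem.Set.empty (pv_gc_nodup prev k)
      (by intro c _; simp [PySem.Set.empty])]
    simp [PySem.Set.empty]
  have hfused := pv_fused_items prev k
  rw [← hPfilter] at hfused
  generalize hPg : prune_candidates (generate_candidates prev k) prev k = P at hnd hprops hfused ⊢
  have hitems : (P.foldl (fun d itemset => d.insert itemset 0)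
      (PySem.Dict.empty : PySem.Dict (List String) Int)).items =
      P.map (fun c => (c, (0 : Int))) := pv_init_items P hnd
  have hsame : (prev.foldl (fun counts a =>
      prev.foldl (fun counts b =>
        let u := PySem.Set.union (PySem.Set.ofList a) (PySem.Set.ofList b)
        if PySem.Set.len u = k then
          let key := PySem.List.sorted u (fun x => x) false
          if !counts.contains key
              && (PySem.List.combinations key (k - 1).toNat).all
                  (fun sub => PySem.Set.contains (PySem.Set.ofList prev) sub) then
            counts.insert key 0
          else counts
        else counts) counts) (PySem.Dict.empty : PySem.Dict (List String) Int)) =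
      P.foldl (fun d itemset => d.insert itemset 0) (PySem.Dict.empty : PySem.Dict (List String) Int) := by
    apply PySem.Dict.ext
    rw [hfused, hitems]
  rw [hsame]
  generalize hIg : P.foldl (fun d itemset => d.insert itemset 0)
      (PySem.Dict.empty : PySem.Dict (List String) Int) = init at hitems ⊢
  have hkeys : init.keys = P := by
    show init.items.map Prod.fst = P
    rw [hitems, List.map_map]
    simp [Function.comp_def]
  by_cases hPnil : P = []
  · subst hPnil
    have hsize : init.size = 0 := by
      show init.items.length = 0
      rw [hitems]; rfl
    simp only [hsize, ne_eq, not_true_eq_false, if_false, List.foldl_nil]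
    have hid : ∀ (l : List (List String)) (d : PySem.Dict (List String) Int),
        l.foldl (fun d _ => d) d = d := by
      intro l
      induction l with
      | nil => intro d; rfl
      | cons t rest ih => intro d; exact ih d
    rw [hid]
  · have hsize : init.size ≠ 0 := by
      show init.items.length ≠ 0
      rw [hitems]
      simpa using hPnil
    simp only [hsize, ne_eq, not_false_eq_true, if_true]
    rw [pv_outer_eq P k hnd hprops data init hkeys]
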